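-- pv_equiv track=rewrite | github.com/CanAtesRepo/PlagiarismCheckForAsm | asm_processing.py | extract_main_loop_region
-- ===== SOURCE A (Python) =====
-- def extract_main_loop_region(text: str) -> str:
--     """
--     Tek bir .asm dosyasının içinden '; Main loop here' ile
--     '; Stack Pointer definition' arasını alır.
--     """
--     lines = text.splitlines()
--     main_started = False
--     result = []
--
--     for line in lines:
--         if not main_started and '; Main loop here' in line:
--             main_started = True
--             continue
--
--         if main_started:
--             if '; Stack Pointer definition' in line:
--                 break
--             result.append(line)
--
--     return '\n'.join(result)
-- ===== SOURCE B (Python) =====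
-- def extract_main_loop_region(text: str) -> str:
--     lines = text.splitlines()
--     for i, line in enumerate(lines):
--         if '; Main loop here' in line:
--             rest = lines[i + 1:]
--             for j, l2 in enumerate(rest):
--                 if '; Stack Pointer definition' in l2:
--                     return '\n'.join(rest[:j])
--             return '\n'.join(rest)
--     return ''
-- ===== Notes on version B (the rewrite author's own statement) =====
-- stated objective: simpler
-- what changed: Replaced the single-pass boolean-flag state machine with an index-locate-then-slice decomposition: find the first start-marker line, then find the first end-marker line after it, and join the slice between them.
import Mathlib
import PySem

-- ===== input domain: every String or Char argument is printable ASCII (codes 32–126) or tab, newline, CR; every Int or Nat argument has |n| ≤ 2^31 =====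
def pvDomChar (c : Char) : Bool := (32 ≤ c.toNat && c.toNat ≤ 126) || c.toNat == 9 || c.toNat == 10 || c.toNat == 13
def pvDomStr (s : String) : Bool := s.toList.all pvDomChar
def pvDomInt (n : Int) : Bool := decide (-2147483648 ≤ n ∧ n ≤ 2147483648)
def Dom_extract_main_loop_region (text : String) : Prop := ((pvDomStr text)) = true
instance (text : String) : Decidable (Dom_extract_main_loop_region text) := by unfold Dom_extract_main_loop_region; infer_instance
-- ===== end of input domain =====

-- B replaces A's boolean-flag single-pass state machine with an index-locate-then-slice
-- decomposition (simpler); equal return value on all inputs.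


-- ===== PORT A =====
-- the two marker tests ('<marker> in line'):
def pvIsStart (l : String) : Bool := PySem.Str.isIn "; Main loop here" l
def pvIsEnd (l : String) : Bool := PySem.Str.isIn "; Stack Pointer definition" l

-- A's for-loop: state = (main_started, result accumulator), break returns result so far
def pvLoopA (lines : List String) (started : Bool) (result : List String) : List String :=
  match lines with
  | [] => result
  | l :: rest =>
    if !started && pvIsStart l then
      pvLoopA rest true result
    else if started then
      if pvIsEnd l then result
      else pvLoopA rest started (result ++ [l])
    else pvLoopA rest started result

def extract_main_loop_region (text : String) : String :=
  PySem.Str.join "\n" (pvLoopA (PySem.Str.splitlines text) false [])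

-- ===== PORT B =====
def extract_main_loop_region_alt (text : String) : String :=
  let lines := PySem.Str.splitlines text
  match lines.findIdx? pvIsStart with
  | none => ""
  | some i =>
    let rest := lines.drop (i + 1)
    match rest.findIdx? pvIsEnd with
    | none => PySem.Str.join "\n" rest
    | some j => PySem.Str.join "\n" (rest.take j)

-- ===== PRECONDITION & SPEC =====
def Spec_extract_main_loop_region (text : String) (out : String) : Prop := out = extract_main_loop_region_alt text
instance (text : String) (out : String) : Decidable (Spec_extract_main_loop_region text out) := by unfold Spec_extract_main_loop_region; infer_instance

-- ===== CLAIM (what is proved, stated in full; the proofs are below) =====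
def Claim_equal_extract_main_loop_region : Prop := ∀ (text : String), Dom_extract_main_loop_region text → Spec_extract_main_loop_region text (extract_main_loop_region text)

-- ===== LEMMAS AND PROOFS =====

-- after the start marker, A's loop returns acc ++ (the prefix before the first end-marker line)
theorem pvLoopA_true (lines : List String) (acc : List String) :
    pvLoopA lines true acc =
      acc ++ (match lines.findIdx? pvIsEnd with
              | none => lines
              | some j => lines.take j) := by
  induction lines generalizing acc with
  | nil => simp [pvLoopA]
  | cons l rest ih =>
    rw [pvLoopA, List.findIdx?_cons]
    by_cases h : pvIsEnd l = true
    · rw [h]; simp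
    · rw [Bool.not_eq_true] at h
      rw [h]
      simp only [Bool.not_true, Bool.false_and, Bool.false_eq_true, if_false]
      rw [ih (acc ++ [l])]
      cases rest.findIdx? pvIsEnd <;> simp

-- before the start marker, A's loop skips lines until the first start-marker line
theorem pvLoopA_false (lines : List String) :
    pvLoopA lines false [] =
      match lines.findIdx? pvIsStart with
      | none => []
      | some i => pvLoopA (lines.drop (i + 1)) true [] := by
  induction lines with
  | nil => simp [pvLoopA]
  | cons l rest ih =>
    rw [pvLoopA, List.findIdx?_cons]
    by_cases h : pvIsStart l = true
    · rw [h]; simp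
    · rw [Bool.not_eq_true] at h
      rw [h]
      simp only [Bool.not_false, Bool.true_and, Bool.false_eq_true, if_false]
      rw [ih]
      cases rest.findIdx? pvIsStart <;> simp

-- ===== VERDICT (by name: the statement is the Claim_ definition above) =====
theorem extract_main_loop_region_spec : Claim_equal_extract_main_loop_region := by
  intro text _
  unfold Spec_extract_main_loop_region extract_main_loop_region extract_main_loop_region_alt
  rw [pvLoopA_false]
  cases hs : (PySem.Str.splitlines text).findIdx? pvIsStart with
  | none => simp only [hs]; decide
  | some i =>
    simp only [hs, pvLoopA_true]
    cases ((PySem.Str.splitlines text).drop (i + 1)).findIdx? pvIsEnd <;> simp
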